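-- pv_equiv track=rewrite | github.com/PixeStudio/LEDGER | ledger.py | suggest_accounts
-- ===== SOURCE A (Python) =====
-- def suggest_accounts(data, prefix, limit=12):
--     prefix = prefix.strip()
--     if prefix == "":
--         return []
--
--     matches = []
--     for code, acc in data["accounts"].items():
--         if code.startswith(prefix):
--             matches.append((code, acc))
--
--     matches.sort(key=lambda x: x[0])
--     return matches[:limit]
-- ===== SOURCE B (Python) =====
-- def suggest_accounts(data, prefix, limit=12):
--     prefix = prefix.strip()
--     if prefix == "":
--         return []
--
--     ordered = []
--     for code, acc in data["accounts"].items():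
--         if code.startswith(prefix):
--             ordered = _insert_sorted(ordered, (code, acc))
--
--     return ordered[:limit]
--
--
-- def _insert_sorted(xs, item):
--     # splice item into the sorted list xs, after all entries with code <= item's code
--     out = []
--     i = 0
--     while i < len(xs) and xs[i][0] <= item[0]:
--         out.append(xs[i])
--         i += 1
--     out.append(item)
--     out.extend(xs[i:])
--     return out
-- ===== Notes on version B (the rewrite author's own statement) =====
-- stated objective: alternative
-- what changed: Instead of collecting all matches and then calling sort, B maintains the matching pairs as a sorted list throughout the single scan, splicing each match into place, and slices that already-sorted list; no sort call remains.
-- outside the precondition, e.g. on suggest_accounts({}, 'a', 12): A raises KeyError, B raises KeyError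
import Mathlib
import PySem

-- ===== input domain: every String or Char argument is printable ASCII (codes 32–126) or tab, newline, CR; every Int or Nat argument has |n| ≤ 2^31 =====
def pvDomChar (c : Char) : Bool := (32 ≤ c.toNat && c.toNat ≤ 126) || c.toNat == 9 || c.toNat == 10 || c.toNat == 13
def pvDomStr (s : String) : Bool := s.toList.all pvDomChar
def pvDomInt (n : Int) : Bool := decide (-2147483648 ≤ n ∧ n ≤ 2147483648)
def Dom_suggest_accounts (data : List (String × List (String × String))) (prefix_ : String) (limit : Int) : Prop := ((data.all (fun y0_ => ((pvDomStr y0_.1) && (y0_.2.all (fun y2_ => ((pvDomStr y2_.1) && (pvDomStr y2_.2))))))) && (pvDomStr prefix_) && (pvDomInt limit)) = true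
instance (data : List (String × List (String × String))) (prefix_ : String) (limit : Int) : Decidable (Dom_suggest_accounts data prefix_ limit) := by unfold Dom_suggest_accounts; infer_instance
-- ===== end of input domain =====

-- B replaces collect-then-sort-then-slice by maintaining the matches as a sorted list during the single scan (ordered splice-in, no sort call); same cost class, stated as 'alternative'.
-- ===== PORT A =====
def suggest_accounts (data : List (String × List (String × String))) (prefix_ : String) (limit : Int) : List (String × String) :=
  let p := PySem.Str.strip prefix_
  if p = "" then []
  else
    match (PySem.Dict.ofList data).get? "accounts" with
    | none => []  -- Python raises KeyError here; excluded by Pre_suggest_accounts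
    | some accounts =>
      let ms := (PySem.Dict.ofList accounts).items.foldl
        (fun m ca => if PySem.Str.startswith ca.1 p then m ++ [ca] else m) []
      PySem.List.slice (PySem.List.sorted ms (fun x => x.1) false) none (some limit)

-- ===== PORT B =====
-- _insert_sorted: scan past entries with code ≤ item's code, then splice item in front of the rest
def pvInsertSorted (xs : List (String × String)) (item : String × String) : List (String × String) :=
  match xs with
  | [] => [item]
  | y :: ys => if y.1 ≤ item.1 then y :: pvInsertSorted ys item else item :: y :: ys

def suggest_accounts_alt (data : List (String × List (String × String))) (prefix_ : String) (limit : Int) : List (String × String) :=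
  let p := PySem.Str.strip prefix_
  if p = "" then []
  else
    match (PySem.Dict.ofList data).get? "accounts" with
    | none => []  -- Python raises KeyError here; excluded by Pre_suggest_accounts
    | some accounts =>
      let ordered := (PySem.Dict.ofList accounts).items.foldl
        (fun o ca => if PySem.Str.startswith ca.1 p then pvInsertSorted o ca else o) []
      PySem.List.slice ordered none (some limit)

-- Pre_ excludes exactly the inputs on which Python raises KeyError: a non-empty stripped
-- prefix together with a data dict that has no "accounts" key (B raises there too).
def Pre_suggest_accounts (data : List (String × List (String × String))) (prefix_ : String) (limit : Int) : Prop :=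
  PySem.Str.strip prefix_ = "" ∨ (PySem.Dict.ofList data).contains "accounts" = true
instance (data : List (String × List (String × String))) (prefix_ : String) (limit : Int) : Decidable (Pre_suggest_accounts data prefix_ limit) := by unfold Pre_suggest_accounts; infer_instance

def pvWitness_suggest_accounts : (List (String × List (String × String))) × String × Int :=
  ([("accounts", [("101", "Cash"), ("102", "Bank"), ("201", "Sales")])], "10", 12)

-- ===== PRECONDITION & SPEC =====
def Spec_suggest_accounts (data : List (String × List (String × String))) (prefix_ : String) (limit : Int) (out : List (String × String)) : Prop := out = suggest_accounts_alt data prefix_ limit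
instance (data : List (String × List (String × String))) (prefix_ : String) (limit : Int) (out : List (String × String)) : Decidable (Spec_suggest_accounts data prefix_ limit out) := by unfold Spec_suggest_accounts; infer_instance

-- ===== CLAIM (what is proved, stated in full; the proofs are below) =====
def Claim_equal_suggest_accounts : Prop := ∀ (data : List (String × List (String × String))) (prefix_ : String) (limit : Int), Dom_suggest_accounts data prefix_ limit → Pre_suggest_accounts data prefix_ limit → Spec_suggest_accounts data prefix_ limit (suggest_accounts data prefix_ limit)

-- ===== LEMMAS AND PROOFS =====

lemma pvInsertSorted_eq_insertBy (item : String × String) (xs : List (String × String)) :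
    pvInsertSorted xs item =
      PySem.List.insertBy (fun a b : String × String => decide (a.1 < b.1)) item xs := by
  induction xs with
  | nil => rfl
  | cons y ys ih =>
      simp only [pvInsertSorted, PySem.List.insertBy, ih]
      by_cases h : y.1 ≤ item.1
      · rw [if_pos h, if_neg (by simpa using not_lt.mpr h)]
      · rw [if_neg h, if_pos (by simpa using lt_of_not_ge h)]

lemma pv_loop_eq (pred : String × String → Bool) (items : List (String × String)) :
    items.foldl (fun o ca => if pred ca then pvInsertSorted o ca else o) [] =
      PySem.List.sorted
        (items.foldl (fun m ca => if pred ca then m ++ [ca] else m) [])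
        (fun x => x.1) false := by
  have hA : items.foldl (fun m ca => if pred ca then m ++ [ca] else m) ([] : List (String × String))
      = items.filter pred := by
    simpa using PySem.List.foldl_append_if pred id items []
  rw [hA]
  simp only [PySem.List.sorted, if_neg (by decide : ¬ (false = true))]
  rw [List.foldl_filter]
  simp only [pvInsertSorted_eq_insertBy]

-- ===== VERDICT (by name: the statement is the Claim_ definition above) =====
theorem suggest_accounts_spec : Claim_equal_suggest_accounts := by
  intro data prefix_ limit _dom _pre
  unfold Spec_suggest_accounts suggest_accounts suggest_accounts_alt
  by_cases hp : PySem.Str.strip prefix_ = ""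
  · simp [hp]
  · simp only [if_neg hp]
    have hc : (PySem.Dict.ofList data).contains "accounts" = true := _pre.resolve_left hp
    rw [PySem.Dict.contains_eq_isSome_get?] at hc
    obtain ⟨accounts, h⟩ := Option.isSome_iff_exists.mp hc
    rw [h]
    dsimp only
    rw [pv_loop_eq]
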